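-- pv_equiv track=rewrite | github.com/tetrix1993/anime-web-scraper | anime/main_download.py | generate_image_name_from_url
-- ===== SOURCE A (Python) =====
-- def generate_image_name_from_url(url, stop_text, separator='_'):
--     period_index = url.split('?')[0].rfind('.')
--     if period_index >= 0:
--         name = url[0:period_index]
--     else:
--         name = url
--     name_split = name.split('/')
--     image_name = name_split[-1]
--     for i in reversed(range(len(name_split) - 1)):
--         if len(name_split[i]) == 0:
--             continue
--
--         if name_split[i] == stop_text:
--             return image_name
--         else:
--             image_name = name_split[i] + separator + image_name
--     return image_name
-- ===== SOURCE B (Python) =====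
-- def generate_image_name_from_url(url, stop_text, separator='_'):
--     period_index = url.split('?')[0].rfind('.')
--     if period_index >= 0:
--         name = url[0:period_index]
--     else:
--         name = url
--     segments = name.split('/')
--     pre = segments[:-1]
--     cut = -1
--     for i, s in enumerate(pre):
--         if s and s == stop_text:
--             cut = i
--     parts = [s for s in pre[cut + 1:] if s]
--     parts.append(segments[-1])
--     return separator.join(parts)
-- ===== Notes on version B (the rewrite author's own statement) =====
-- stated objective: alternative
-- what changed: A builds the name by short-circuiting backward concatenation (prepending each non-empty segment until the stop segment is hit); B instead scans the segments forward once to find the last non-empty segment equal to stop_text, slices past it, filters out empty segments and joins them with the separator.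
import Mathlib
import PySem

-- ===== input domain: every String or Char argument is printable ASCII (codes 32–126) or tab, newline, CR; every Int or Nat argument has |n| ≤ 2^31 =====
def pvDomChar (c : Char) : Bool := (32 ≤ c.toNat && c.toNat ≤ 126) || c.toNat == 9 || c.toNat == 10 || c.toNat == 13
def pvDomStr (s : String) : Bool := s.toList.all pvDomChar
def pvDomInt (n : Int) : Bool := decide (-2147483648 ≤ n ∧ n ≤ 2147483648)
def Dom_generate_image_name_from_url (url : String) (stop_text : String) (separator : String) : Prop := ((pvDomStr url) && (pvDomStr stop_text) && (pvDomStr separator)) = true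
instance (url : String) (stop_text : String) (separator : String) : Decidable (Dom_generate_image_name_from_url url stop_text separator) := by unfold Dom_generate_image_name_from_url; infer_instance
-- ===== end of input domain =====

-- B replaces A's backward short-circuiting concatenation with a forward scan for the last
-- stop segment followed by slice + filter + join (objective: alternative decomposition, same cost).

-- ===== PORT A =====
-- A's loop 'for i in reversed(range(len(name_split)-1))' reads name_split[len-2], …, name_split[0],
-- i.e. exactly name_split.dropLast in reverse; ported as structural recursion over that reversed
-- prefix ('return' = stop recursing, 'continue' = recurse unchanged).
-- 's1 + sep + s2' on strings is ported as PySem.Str.join "" [s1, sep, s2] (exact concatenation).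
def pvLoopA (stop_text separator : String) : List String → String → String
  | [], image_name => image_name
  | s :: rest, image_name =>
    if PySem.Str.len s = 0 then pvLoopA stop_text separator rest image_name
    else if s = stop_text then image_name
    else pvLoopA stop_text separator rest (PySem.Str.join "" [s, separator, image_name])

def generate_image_name_from_url (url : String) (stop_text : String) (separator : String) : String :=
  -- url.split('?')[0]: split? is some (the separator "?" is nonempty) and returns a nonempty list,
  -- so the getD/headD defaults are never used; likewise for split on "/" and name_split[-1] below.
  let period_index := PySem.Str.rfind (((PySem.Str.split? url "?").getD []).headD "") "."
  let name := if period_index ≥ 0 then PySem.Str.slice url (some 0) (some period_index) else url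
  let name_split := (PySem.Str.split? name "/").getD []
  let image_name := (PySem.List.pyGet? name_split (-1)).getD ""
  pvLoopA stop_text separator name_split.dropLast.reverse image_name

-- ===== PORT B =====
def generate_image_name_from_url_alt (url : String) (stop_text : String) (separator : String) : String :=
  let period_index := PySem.Str.rfind (((PySem.Str.split? url "?").getD []).headD "") "."
  let name := if period_index ≥ 0 then PySem.Str.slice url (some 0) (some period_index) else url
  let segments := (PySem.Str.split? name "/").getD []
  let pre := PySem.List.slice segments none (some (-1))          -- segments[:-1]
  let cut := (PySem.List.enumerate pre 0).foldl
      (fun c p => if p.2 ≠ "" ∧ p.2 = stop_text then p.1 else c) (-1 : Int)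
  let parts := (PySem.List.slice pre (some (cut + 1)) none).filter (fun s => decide (s ≠ ""))
  PySem.Str.join separator (parts ++ [(PySem.List.pyGet? segments (-1)).getD ""])

-- ===== PRECONDITION & SPEC =====
def Spec_generate_image_name_from_url (url : String) (stop_text : String) (separator : String) (out : String) : Prop := out = generate_image_name_from_url_alt url stop_text separator
instance (url : String) (stop_text : String) (separator : String) (out : String) : Decidable (Spec_generate_image_name_from_url url stop_text separator out) := by unfold Spec_generate_image_name_from_url; infer_instance

-- ===== CLAIM (what is proved, stated in full; the proofs are below) =====
def Claim_equal_generate_image_name_from_url : Prop := ∀ (url : String) (stop_text : String) (separator : String), Dom_generate_image_name_from_url url stop_text separator → Spec_generate_image_name_from_url url stop_text separator (generate_image_name_from_url url stop_text separator)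

-- ===== LEMMAS AND PROOFS =====

-- B's 'cut' fold, named for the proofs (definitionally the fold inside the port).
def pvCut (stop_text : String) (pre : List String) : Int :=
  (PySem.List.enumerate pre 0).foldl
    (fun c p => if p.2 ≠ "" ∧ p.2 = stop_text then p.1 else c) (-1 : Int)

theorem pvJoin_singleton (sep p : String) : PySem.Str.join sep [p] = p := by
  apply String.toList_inj.mp
  simp [PySem.Str.toList_join, PySem.Chars.join_singleton]

theorem pvJoin_cons (sep s : String) (parts : List String) (hp : parts ≠ []) :
    PySem.Str.join "" [s, sep, PySem.Str.join sep parts] = PySem.Str.join sep (s :: parts) := by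
  obtain ⟨q, rest, rfl⟩ : ∃ q rest, parts = q :: rest := by
    cases parts with
    | nil => exact absurd rfl hp
    | cons q rest => exact ⟨q, rest, rfl⟩
  apply String.toList_inj.mp
  simp [PySem.Str.toList_join, PySem.Chars.join_cons_cons, PySem.Chars.join_singleton]

theorem pvLoopA_eq (stop_text sep : String) (r : List String) :
    ∀ parts : List String, parts ≠ [] →
    pvLoopA stop_text sep r (PySem.Str.join sep parts)
      = PySem.Str.join sep
          (((r.takeWhile (fun s => !decide (s ≠ "" ∧ s = stop_text))).reverse.filter
              (fun s => decide (s ≠ ""))) ++ parts) := by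
  induction r with
  | nil => intro parts hp; simp [pvLoopA]
  | cons s rest IH =>
    intro parts hp
    by_cases hs : s = ""
    · subst hs
      simp only [pvLoopA, PySem.Str.len_eq]
      rw [if_pos (by simp)]
      rw [IH parts hp]
      simp
    · have hlen : ¬ (PySem.Str.len s = 0) := by
        simp [PySem.Str.len_eq]; exact hs
      by_cases hst : s = stop_text
      · subst hst
        simp only [pvLoopA]
        rw [if_neg hlen]
        simp [hs]
      · simp only [pvLoopA]
        rw [if_neg hlen, if_neg hst]
        rw [pvJoin_cons sep s parts hp]
        rw [IH (s :: parts) (by simp)]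
        simp [hs, hst, List.filter_append]

theorem pvCut_append (stop_text x : String) (xs : List String) :
    pvCut stop_text (xs ++ [x])
      = if x ≠ "" ∧ x = stop_text then (xs.length : Int) else pvCut stop_text xs := by
  unfold pvCut
  rw [PySem.List.enumerate_append, List.foldl_append]
  simp [PySem.List.enumerate_cons, PySem.List.enumerate_nil]

theorem pvCut_bounds (stop_text : String) (pre : List String) :
    -1 ≤ pvCut stop_text pre ∧ pvCut stop_text pre < pre.length := by
  induction pre using List.reverseRecOn with
  | nil => simp [pvCut, PySem.List.enumerate_nil]
  | append_singleton xs x IH =>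
    rw [pvCut_append]
    obtain ⟨h1, h2⟩ := IH
    split_ifs <;>
      · simp only [List.length_append, List.length_cons, List.length_nil]
        push_cast
        omega

theorem pvDrop_cut (stop_text : String) (pre : List String) :
    List.drop (pvCut stop_text pre + 1).toNat pre
      = (pre.reverse.takeWhile (fun s => !decide (s ≠ "" ∧ s = stop_text))).reverse := by
  induction pre using List.reverseRecOn with
  | nil => simp
  | append_singleton xs x IH =>
    rw [pvCut_append]
    by_cases hx : x ≠ "" ∧ x = stop_text
    · rw [if_pos hx]
      obtain ⟨hx1, hx2⟩ := hx
      subst hx2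
      have h1 : ((xs.length : Int) + 1).toNat = xs.length + 1 := by omega
      rw [h1]
      rw [List.drop_eq_nil_of_le (by simp)]
      rw [List.reverse_append]
      simp only [List.reverse_cons, List.reverse_nil, List.nil_append, List.singleton_append]
      simp [hx1]
    · rw [if_neg hx]
      have hb := pvCut_bounds stop_text xs
      have hle : (pvCut stop_text xs + 1).toNat ≤ xs.length := by omega
      rw [List.drop_append_of_le_length hle, IH]
      rw [List.reverse_append]
      simp only [List.reverse_cons, List.reverse_nil, List.nil_append, List.singleton_append]
      by_cases h1 : x = ""
      · simp [h1]
      · simp only [not_and] at hx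
        simp [h1, hx h1]

-- Agreement of the two loop shapes on an arbitrary split result and last segment.
theorem pvCore (stop_text sep : String) (segs : List String) (last : String) :
    pvLoopA stop_text sep segs.dropLast.reverse last
      = PySem.Str.join sep
          (((PySem.List.slice (PySem.List.slice segs none (some (-1)))
                (some (pvCut stop_text (PySem.List.slice segs none (some (-1))) + 1))
                none).filter (fun s => decide (s ≠ ""))) ++ [last]) := by
  rw [PySem.List.slice_to_neg_one]
  have hb := pvCut_bounds stop_text segs.dropLast
  rw [PySem.List.slice_from _ (by omega : (0:Int) ≤ pvCut stop_text segs.dropLast + 1)]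
  rw [pvDrop_cut]
  rw [List.filter_reverse]
  conv_lhs => rw [← pvJoin_singleton sep last]
  rw [pvLoopA_eq stop_text sep segs.dropLast.reverse [last] (by simp)]
  rw [List.filter_reverse]

-- ===== VERDICT (by name: the statement is the Claim_ definition above) =====
theorem generate_image_name_from_url_spec : Claim_equal_generate_image_name_from_url := by
  intro url stop_text separator _
  unfold Spec_generate_image_name_from_url
  unfold generate_image_name_from_url generate_image_name_from_url_alt
  exact (pvCore stop_text separator _ _).symm ▸ rfl
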